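-- pv_equiv track=rewrite | github.com/dwood1/Projects | Python/TemporalFeatures/Features.py | dx_max
-- ===== SOURCE A (Python) =====
-- def dx_max(input_array, interval):
--     output_array = [1 for i in input_array]
--     l = len(input_array)
--     for t in range(l):
--         if(t-interval >= 0):
--             temp_list = [input_array[i+1] - input_array[i] for i in range(t-interval, t)]
--             output_array[t] = max(temp_list)
--     return output_array
-- ===== SOURCE B (Python) =====
-- def dx_max(input_array, interval):
--     l = len(input_array)
--     out = [1] * l
--     diffs = [input_array[i + 1] - input_array[i] for i in range(l - 1)]
--     dq = []   # indices into diffs whose values strictly decrease; used as a deque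
--     head = 0  # front pointer of the deque
--     for t in range(l):
--         if t >= 1:
--             j = t - 1
--             while len(dq) > head and diffs[dq[-1]] <= diffs[j]:
--                 dq.pop()
--             dq.append(j)
--         if t - interval >= 0:
--             while dq[head] < t - interval:
--                 head += 1
--             out[t] = diffs[dq[head]]
--     return out
-- ===== Notes on version B (the rewrite author's own statement) =====
-- stated objective: faster
-- what changed: Precompute the consecutive differences once and compute each sliding-window maximum with a monotonic deque (strictly decreasing values, lazy front pointer) in amortized O(1) per index, instead of rebuilding the difference window and rescanning it with max() for every index.
import Mathlib
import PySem

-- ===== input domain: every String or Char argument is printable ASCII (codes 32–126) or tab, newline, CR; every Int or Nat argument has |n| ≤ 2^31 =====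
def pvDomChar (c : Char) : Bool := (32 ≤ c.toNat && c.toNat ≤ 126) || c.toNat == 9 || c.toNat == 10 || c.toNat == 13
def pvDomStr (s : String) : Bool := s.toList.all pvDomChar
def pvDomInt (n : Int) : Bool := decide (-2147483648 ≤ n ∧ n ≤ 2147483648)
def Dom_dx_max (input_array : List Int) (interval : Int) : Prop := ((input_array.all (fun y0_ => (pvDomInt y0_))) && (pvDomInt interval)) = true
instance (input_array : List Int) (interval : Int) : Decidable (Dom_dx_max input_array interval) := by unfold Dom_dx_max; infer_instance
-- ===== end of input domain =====

-- B precomputes the consecutive differences once and maintains a monotonic deque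
-- (indices with strictly decreasing difference values, lazy front pointer), giving each
-- window maximum in amortized O(1) instead of A's rebuild-and-rescan per index.

-- ===== PORT A =====
def dx_max (input_array : List Int) (interval : Int) : List Int :=
  let output_array := input_array.map (fun _ => (1 : Int))
  let l : Int := input_array.length
  (PySem.List.pyRange 0 l 1).foldl
    (fun output_array t =>
      if t - interval ≥ 0 then
        let temp_list := (PySem.List.pyRange (t - interval) t 1).map
          (fun i => PySem.List.pyGetD input_array (i + 1) 0 - PySem.List.pyGetD input_array i 0)
        PySem.List.pySetD output_array t ((PySem.List.max? temp_list (fun y => y)).getD 0)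
      else output_array)
    output_array

-- ===== PORT B =====
-- while len(dq) > head and diffs[dq[-1]] <= diffs[j]: dq.pop()
def pvPop (d : List Int) (head : Nat) (v : Int) (dq : List Nat) : List Nat :=
  if h : head < dq.length ∧ d.getD ((dq.getLast?).getD 0) 0 ≤ v then
    pvPop d head v dq.dropLast
  else dq
termination_by dq.length
decreasing_by
  obtain ⟨h1, _⟩ := h
  simp only [List.length_dropLast]
  omega

-- while dq[head] < t - interval: head += 1   (total form: stops at the end of dq)
def pvAdv (dq : List Nat) (lo : Int) (head : Nat) : Nat :=
  if h : head < dq.length then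
    if ((dq.getD head 0 : Nat) : Int) < lo then pvAdv dq lo (head + 1) else head
  else head
termination_by dq.length - head

-- one iteration of B's loop body (state: out, dq, head)
def pvStep (d : List Int) (interval : Int) (st : List Int × List Nat × Nat) (t : Nat) :
    List Int × List Nat × Nat :=
  let out := st.1
  let dq := st.2.1
  let head := st.2.2
  let dq := if 1 ≤ t then pvPop d head (d.getD (t - 1) 0) dq ++ [t - 1] else dq
  if (t : Int) - interval ≥ 0 then
    let head := pvAdv dq ((t : Int) - interval) head
    (out.set t (d.getD (dq.getD head 0) 0), dq, head)
  else (out, dq, head)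

def dx_max_alt (input_array : List Int) (interval : Int) : List Int :=
  let l := input_array.length
  let out := List.replicate l (1 : Int)
  let diffs := (List.range (l - 1)).map
    (fun i => input_array.getD (i + 1) 0 - input_array.getD i 0)
  ((List.range l).foldl (pvStep diffs interval) (out, ([] : List Nat), 0)).1

-- ===== PRECONDITION & SPEC =====
-- Pre_ excludes interval ≤ 0 on a nonempty list: there A's max([]) raises ValueError
-- (and B's dq[head] raises IndexError); both programs return on every other input.
def Pre_dx_max (input_array : List Int) (interval : Int) : Prop :=
  1 ≤ interval ∨ input_array = []
instance (input_array : List Int) (interval : Int) : Decidable (Pre_dx_max input_array interval) := by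
  unfold Pre_dx_max; infer_instance

def pvWitness_dx_max : List Int × Int := ([4, 1, 3, 2], 2)

def Spec_dx_max (input_array : List Int) (interval : Int) (out : List Int) : Prop :=
  out = dx_max_alt input_array interval
instance (input_array : List Int) (interval : Int) (out : List Int) : Decidable (Spec_dx_max input_array interval out) := by
  unfold Spec_dx_max; infer_instance

-- ===== CLAIM (what is proved, stated in full; the proofs are below) =====
def Claim_equal_dx_max : Prop := ∀ (input_array : List Int) (interval : Int), Dom_dx_max input_array interval → Pre_dx_max input_array interval → Spec_dx_max input_array interval (dx_max input_array interval)

-- ===== LEMMAS AND PROOFS =====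

-- the difference list both loops talk about
def pvDiffs (a : List Int) : List Int :=
  (List.range (a.length - 1)).map (fun i => a.getD (i + 1) 0 - a.getD i 0)

-- records of the half-open index window [lo, e): indices whose value beats everything after them
def pvRecP (d : List Int) (e j : Nat) : Bool :=
  (List.range' (j + 1) (e - (j + 1))).all (fun j' => decide (d.getD j' 0 < d.getD j 0))

def pvRecs (d : List Int) (lo e : Nat) : List Nat :=
  (List.range' lo (e - lo)).filter (pvRecP d e)

-- the window maximum value for output index t (window [t-K, t), K ≥ 1 elements)
def pvWmax (d : List Int) (K t : Nat) : Int :=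
  ((List.range' (t - K + 1) (K - 1)).map (fun j => d.getD j 0)).foldl max (d.getD (t - K) 0)

-- the output list after m loop iterations
def pvOutP (d : List Int) (K n m : Nat) : List Int :=
  (List.range n).map (fun s => if s < m ∧ K ≤ s then pvWmax d K s else 1)

lemma pv_range'_concat (a b : Nat) (h : a ≤ b) :
    List.range' a (b + 1 - a) = List.range' a (b - a) ++ [b] := by
  have h2 := List.range'_append (s := a) (m := b - a) (n := 1) (step := 1)
  rw [show b + 1 - a = (b - a) + 1 from by omega, ← h2,
    show a + 1 * (b - a) = b from by omega, List.range'_one]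

lemma pv_set_map_range {n t : Nat} (f g : Nat → Int) (v : Int) (ht : t < n)
    (hfg : ∀ s, s ≠ t → f s = g s) (hv : v = g t) :
    ((List.range n).map f).set t v = (List.range n).map g := by
  apply List.ext_getElem
  · simp
  · intro i h1 h2
    simp only [List.getElem_set, List.getElem_map, List.getElem_range]
    by_cases hit : i = t
    · simp [hit, hv]
    · rw [if_neg (fun h => hit h.symm)]
      exact hfg i hit

lemma pv_mem_recs {d : List Int} {lo e j : Nat} :
    j ∈ pvRecs d lo e ↔ lo ≤ j ∧ j < e ∧ ∀ j', j < j' → j' < e → d.getD j' 0 < d.getD j 0 := by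
  simp only [pvRecs, pvRecP, List.mem_filter, List.mem_range'_1, List.all_eq_true,
    decide_eq_true_eq]
  constructor
  · rintro ⟨⟨hj1, hj2⟩, hall⟩
    exact ⟨hj1, by omega, fun j' h1 h2 => hall j' (by omega)⟩
  · rintro ⟨h1, h2, hall⟩
    refine ⟨⟨h1, by omega⟩, fun j' hj' => ?_⟩
    exact hall j' (by omega) (by omega)

lemma pv_sorted_recs (d : List Int) (lo e : Nat) : (pvRecs d lo e).Pairwise (· < ·) :=
  List.Pairwise.sublist List.filter_sublist (List.pairwise_lt_range' 1 (by norm_num))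

lemma pv_dec_recs (d : List Int) (lo e : Nat) :
    (pvRecs d lo e).Pairwise (fun i j => d.getD j 0 < d.getD i 0) := by
  refine List.Pairwise.imp_of_mem ?_ (pv_sorted_recs d lo e)
  intro i j hi hj hij
  rw [pv_mem_recs] at hi hj
  exact hi.2.2 j hij hj.2.1

lemma pv_pop_nil (d : List Int) (head : Nat) (v : Int) : pvPop d head v [] = [] := by
  rw [pvPop]
  simp

lemma pv_pop_concat (d : List Int) (head : Nat) (v : Int) (q : List Nat) (b : Nat) :
    pvPop d head v (q ++ [b]) =
      if head ≤ q.length ∧ d.getD b 0 ≤ v then pvPop d head v q else q ++ [b] := by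
  conv_lhs => rw [pvPop]
  simp only [List.getLast?_concat, Option.getD_some, List.dropLast_concat,
    List.length_append, List.length_cons, List.length_nil]
  split_ifs with h1 h2 h2
  · rfl
  · exact absurd ⟨by omega, h1.2⟩ h2
  · exact absurd ⟨by omega, h2.2⟩ h1
  · rfl

lemma pv_pop_split (d : List Int) (v : Int) (dq : List Nat) (head : Nat) :
    head ≤ dq.length → pvPop d head v dq = dq.take head ++ pvPop d 0 v (dq.drop head) := by
  induction dq using List.reverseRecOn with
  | nil =>
    intro _
    simp [pv_pop_nil]
  | append_singleton q b ih =>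
    intro h
    rw [pv_pop_concat]
    by_cases hh : head ≤ q.length
    · by_cases hb : d.getD b 0 ≤ v
      · rw [if_pos ⟨hh, hb⟩, ih hh, List.take_append_of_le_length hh,
          List.drop_append_of_le_length hh, pv_pop_concat, if_pos ⟨Nat.zero_le _, hb⟩]
      · rw [if_neg (fun hc => hb hc.2), List.take_append_of_le_length hh,
          List.drop_append_of_le_length hh, pv_pop_concat, if_neg (fun hc => hb hc.2),
          ← List.append_assoc, List.take_append_drop]
    · have hlen : (q ++ [b]).length ≤ head := by
        simp only [List.length_append, List.length_cons, List.length_nil]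
        omega
      rw [if_neg (fun hc => hh hc.1), List.take_of_length_le hlen,
        List.drop_eq_nil_of_le hlen, pv_pop_nil, List.append_nil]

lemma pv_popAct_filter (d : List Int) (v : Int) (q : List Nat) :
    q.Pairwise (fun i j => d.getD j 0 < d.getD i 0) →
    pvPop d 0 v q = q.filter (fun j => decide (v < d.getD j 0)) := by
  induction q using List.reverseRecOn with
  | nil =>
    intro _
    rw [pv_pop_nil]
    rfl
  | append_singleton q b ih =>
    intro hp
    rw [List.pairwise_append] at hp
    obtain ⟨hq, _, hqb⟩ := hp
    rw [pv_pop_concat]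
    by_cases hb : d.getD b 0 ≤ v
    · rw [if_pos ⟨Nat.zero_le _, hb⟩, ih hq, List.filter_append]
      have hbf : [b].filter (fun j => decide (v < d.getD j 0)) = [] := by
        simp only [List.filter_cons, List.filter_nil, decide_eq_true_eq]
        rw [if_neg (by omega)]
      rw [hbf, List.append_nil]
    · rw [if_neg (fun hc => hb hc.2), List.filter_append]
      have h1 : q.filter (fun j => decide (v < d.getD j 0)) = q := by
        rw [List.filter_eq_self]
        intro x hx
        have := hqb x hx b (by simp)
        simp only [decide_eq_true_eq]
        omega
      have h2 : [b].filter (fun j => decide (v < d.getD j 0)) = [b] := by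
        simp only [List.filter_cons, List.filter_nil, decide_eq_true_eq]
        rw [if_pos (by omega)]
      rw [h1, h2]

lemma pv_recs_succ (d : List Int) (lo e : Nat) (hle : lo ≤ e) :
    pvRecs d lo (e + 1) =
      (pvRecs d lo e).filter (fun j => decide (d.getD e 0 < d.getD j 0)) ++ [e] := by
  unfold pvRecs
  rw [pv_range'_concat lo e hle, List.filter_append, List.filter_filter]
  congr 1
  · apply List.filter_congr
    intro j hj
    rw [List.mem_range'_1] at hj
    unfold pvRecP
    rw [pv_range'_concat (j + 1) e (by omega), List.all_append]
    simp [Bool.and_comm]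
  · simp [pvRecP]

lemma pv_push (d : List Int) (lo e : Nat) (hle : lo ≤ e) :
    pvPop d 0 (d.getD e 0) (pvRecs d lo e) ++ [e] = pvRecs d lo (e + 1) := by
  rw [pv_popAct_filter d _ _ (pv_dec_recs d lo e), pv_recs_succ d lo e hle]

lemma pv_recs_mono (d : List Int) (lo lo' e : Nat) (h : lo ≤ lo') :
    pvRecs d lo' e = (pvRecs d lo e).filter (fun j => decide (lo' ≤ j)) := by
  unfold pvRecs
  rw [List.filter_filter]
  by_cases he : lo' ≤ e
  · have hsplit : List.range' lo (e - lo) =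
        List.range' lo (lo' - lo) ++ List.range' lo' (e - lo') := by
      have h2 := List.range'_append (s := lo) (m := lo' - lo) (n := e - lo') (step := 1)
      rw [show lo + 1 * (lo' - lo) = lo' from by omega] at h2
      rw [show e - lo = (lo' - lo) + (e - lo') from by omega]
      exact h2.symm
    rw [hsplit, List.filter_append]
    have h1 : (List.range' lo (lo' - lo)).filter
        (fun j => decide (lo' ≤ j) && pvRecP d e j) = [] := by
      rw [List.filter_eq_nil_iff]
      intro j hj
      rw [List.mem_range'_1] at hj
      simp only [Bool.and_eq_true, decide_eq_true_eq, not_and]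
      intro h'
      exact absurd h' (by omega)
    have h2 : (List.range' lo' (e - lo')).filter
        (fun j => decide (lo' ≤ j) && pvRecP d e j) =
        (List.range' lo' (e - lo')).filter (pvRecP d e) := by
      apply List.filter_congr
      intro j hj
      rw [List.mem_range'_1] at hj
      simp [show lo' ≤ j from hj.1]
    rw [h1, h2, List.nil_append]
  · rw [show e - lo' = 0 from by omega, List.range'_zero, List.filter_nil]
    symm
    rw [List.filter_eq_nil_iff]
    intro j hj
    rw [List.mem_range'_1] at hj
    simp only [Bool.and_eq_true, decide_eq_true_eq, not_and]
    intro h'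
    exact absurd h' (by omega)

lemma pv_dropWhile_filter (lo' : Nat) (l : List Nat) :
    l.Pairwise (· < ·) →
    l.filter (fun j => decide (lo' ≤ j)) = l.dropWhile (fun j => decide (j < lo')) := by
  induction l with
  | nil => intro _; rfl
  | cons a l ih =>
    intro hp
    rw [List.pairwise_cons] at hp
    by_cases ha : a < lo'
    · rw [List.filter_cons, if_neg (by simp; omega), List.dropWhile_cons,
        if_pos (by simp; omega)]
      exact ih hp.2
    · rw [List.filter_cons, if_pos (by simp; omega), List.dropWhile_cons,
        if_neg (by simp; omega)]
      congr 1
      rw [List.filter_eq_self]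
      intro b hb
      have := hp.1 b hb
      simp only [decide_eq_true_eq]
      omega

lemma pv_dropWhile_congr {α : Type} (p q : α → Bool) (l : List α)
    (h : ∀ x ∈ l, p x = q x) : l.dropWhile p = l.dropWhile q := by
  induction l with
  | nil => rfl
  | cons a l ih =>
    rw [List.dropWhile_cons, List.dropWhile_cons, h a (by simp)]
    split
    · exact ih (fun x hx => h x (by simp [hx]))
    · rfl

lemma pv_adv (dq : List Nat) (lo : Int) :
    ∀ head, head ≤ dq.length →
      head ≤ pvAdv dq lo head ∧ pvAdv dq lo head ≤ dq.length ∧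
        dq.drop (pvAdv dq lo head) =
          (dq.drop head).dropWhile (fun (j : Nat) => decide ((j : Int) < lo)) := by
  suffices H : ∀ fuel head, dq.length - head ≤ fuel → head ≤ dq.length →
      head ≤ pvAdv dq lo head ∧ pvAdv dq lo head ≤ dq.length ∧
        dq.drop (pvAdv dq lo head) =
          (dq.drop head).dropWhile (fun (j : Nat) => decide ((j : Int) < lo)) by
    intro head h
    exact H dq.length head (by omega) h
  intro fuel
  induction fuel with
  | zero =>
    intro head hf h
    have : head = dq.length := by omega
    rw [pvAdv, dif_neg (by omega)]
    subst this
    simp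
  | succ fuel ih =>
    intro head hf h
    by_cases h1 : head < dq.length
    · have hcons : dq.drop head = dq[head] :: dq.drop (head + 1) :=
        List.drop_eq_getElem_cons h1
      have hgd : dq.getD head 0 = dq[head] := by
        rw [List.getD_eq_getElem?_getD, List.getElem?_eq_getElem h1]
        rfl
      rw [pvAdv, dif_pos h1]
      by_cases h2 : ((dq.getD head 0 : Nat) : Int) < lo
      · rw [if_pos h2]
        obtain ⟨c1, c2, c3⟩ := ih (head + 1) (by omega) (by omega)
        refine ⟨by omega, c2, ?_⟩
        rw [c3, hcons, List.dropWhile_cons, if_pos (by rw [← hgd]; simp; exact_mod_cast h2)]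
      · rw [if_neg h2]
        refine ⟨le_refl _, by omega, ?_⟩
        rw [hcons, List.dropWhile_cons, if_neg (by rw [← hgd]; simpa using h2)]
    · rw [pvAdv, dif_neg h1]
      have : head = dq.length := by omega
      subst this
      simp

lemma pv_getD_drop (dq : List Nat) (i m : Nat) (rest : List Nat)
    (h : dq.drop i = m :: rest) : dq.getD i 0 = m := by
  have h0 : dq[i]? = some m := by
    rw [show i = i + 0 from by omega, ← List.getElem?_drop, h]
    rfl
  rw [List.getD_eq_getElem?_getD, h0]
  rfl

lemma pv_foldl_max (l : List Int) (a : Int) :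
    (l.foldl max a = a ∨ l.foldl max a ∈ l) ∧ a ≤ l.foldl max a ∧
      ∀ x ∈ l, x ≤ l.foldl max a := by
  induction l generalizing a with
  | nil => simp
  | cons b l ih =>
    obtain ⟨h1, h2, h3⟩ := ih (max a b)
    rw [List.foldl_cons]
    refine ⟨?_, le_trans (le_max_left a b) h2, ?_⟩
    · rcases h1 with h | h
      · rcases max_choice a b with hm | hm
        · left; rw [h, hm]
        · right; rw [h, hm]; exact List.mem_cons_self
      · right; exact List.mem_cons_of_mem b h
    · intro x hx
      rcases List.mem_cons.mp hx with hxb | hx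
      · rw [hxb]
        exact le_trans (le_max_right a b) h2
      · exact h3 x hx

lemma pv_wmax_spec (d : List Int) (K t : Nat) (hK : 1 ≤ K) (ht : K ≤ t) :
    (∃ j, t - K ≤ j ∧ j < t ∧ pvWmax d K t = d.getD j 0) ∧
      ∀ j, t - K ≤ j → j < t → d.getD j 0 ≤ pvWmax d K t := by
  unfold pvWmax
  obtain ⟨h1, h2, h3⟩ := pv_foldl_max
    ((List.range' (t - K + 1) (K - 1)).map (fun j => d.getD j 0)) (d.getD (t - K) 0)
  constructor
  · rcases h1 with h | h
    · exact ⟨t - K, le_refl _, by omega, h⟩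
    · rw [List.mem_map] at h
      obtain ⟨j, hj, hv⟩ := h
      rw [List.mem_range'_1] at hj
      exact ⟨j, by omega, by omega, hv.symm⟩
  · intro j hj1 hj2
    by_cases hj : j = t - K
    · subst hj; exact h2
    · apply h3
      rw [List.mem_map]
      exact ⟨j, by rw [List.mem_range'_1]; omega, rfl⟩

lemma pv_argmax (d : List Int) (lo e : Nat) (h : lo < e) :
    ∃ m, lo ≤ m ∧ m < e ∧ (∀ j, lo ≤ j → j < e → d.getD j 0 ≤ d.getD m 0) ∧
      ∀ j, m < j → j < e → d.getD j 0 < d.getD m 0 := by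
  induction e with
  | zero => omega
  | succ e ih =>
    by_cases he : lo < e
    · obtain ⟨m, hm1, hm2, hmax, hstrict⟩ := ih he
      by_cases hcmp : d.getD m 0 ≤ d.getD e 0
      · refine ⟨e, by omega, by omega, ?_, ?_⟩
        · intro j hj1 hj2
          by_cases hje : j = e
          · subst hje; exact le_refl _
          · exact le_trans (hmax j hj1 (by omega)) hcmp
        · intro j hj1 hj2
          omega
      · refine ⟨m, hm1, by omega, ?_, ?_⟩
        · intro j hj1 hj2
          by_cases hje : j = e
          · subst hje; omega
          · exact hmax j hj1 (by omega)
        · intro j hj1 hj2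
          by_cases hje : j = e
          · subst hje; omega
          · exact hstrict j hj1 (by omega)
    · have heq : lo = e := by omega
      subst heq
      refine ⟨lo, le_refl _, by omega, ?_, ?_⟩
      · intro j h1 h2
        have hj : j = lo := by omega
        subst hj
        exact le_refl _
      · intro j h1 h2
        omega

lemma pv_recs_head (d : List Int) (lo e : Nat) (h : lo < e) :
    ∃ m rest, pvRecs d lo e = m :: rest ∧ lo ≤ m ∧ m < e ∧
      ∀ j, lo ≤ j → j < e → d.getD j 0 ≤ d.getD m 0 := by
  obtain ⟨m, hm1, hm2, hmax, hstrict⟩ := pv_argmax d lo e h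
  have hmem : m ∈ pvRecs d lo e := pv_mem_recs.mpr ⟨hm1, hm2, fun j' h1 h2 => hstrict j' h1 h2⟩
  cases hrec : pvRecs d lo e with
  | nil => rw [hrec] at hmem; exact absurd hmem (by simp)
  | cons hd rest =>
    have hhd : hd ∈ pvRecs d lo e := by rw [hrec]; exact List.mem_cons_self
    rw [pv_mem_recs] at hhd
    refine ⟨hd, rest, rfl, hhd.1, hhd.2.1, ?_⟩
    rw [hrec] at hmem
    rcases List.mem_cons.mp hmem with rfl | hmr
    · exact hmax
    · -- hd < m by sortedness, so hd's record property beats the argmax value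
      have hsort := pv_sorted_recs d lo e
      rw [hrec, List.pairwise_cons] at hsort
      have hlt : hd < m := hsort.1 m hmr
      intro j hj1 hj2
      exact le_trans (hmax j hj1 hj2) (le_of_lt (hhd.2.2 m hlt hm2))

lemma pv_cast_lt_iff (k : Int) (t x : Nat) (hk : 1 ≤ k) :
    ((x : Int) < (t : Int) - k) ↔ (x < t - k.toNat) := by omega

lemma pv_range_map_cons (f : Nat → Int) (K s : Nat) (hK : 1 ≤ K) :
    (List.range K).map (fun j => f (s + j)) = f s :: (List.range' (s + 1) (K - 1)).map f := by
  obtain ⟨K', rfl⟩ : ∃ K', K = K' + 1 := ⟨K - 1, by omega⟩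
  rw [List.range_succ_eq_map, List.map_cons, List.map_map, List.range'_eq_map_range,
    List.map_map]
  simp only [Nat.add_zero, Nat.add_sub_cancel]
  congr 1
  apply List.map_congr_left
  intro j _
  show f (s + (j + 1)) = f (s + 1 + j)
  rw [show s + (j + 1) = s + 1 + j from by omega]

-- B's loop invariant
lemma pv_outP_zero (d : List Int) (K n : Nat) :
    pvOutP d K n 0 = (List.range n).map (fun _ => (1 : Int)) := by
  unfold pvOutP
  exact List.map_congr_left fun s _ => if_neg (by omega)

lemma pv_invB (d : List Int) (k : Int) (hk : 1 ≤ k) (n : Nat) :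
    ∀ t, t ≤ n → ∃ dq head,
      (List.range t).foldl (pvStep d k) ((List.range n).map (fun _ => (1 : Int)), ([] : List Nat), 0) =
        (pvOutP d k.toNat n t, dq, head) ∧ head ≤ dq.length ∧
        dq.drop head = pvRecs d (t - 1 - k.toNat) (t - 1) := by
  have hK1 : 1 ≤ k.toNat := by omega
  intro t
  induction t with
  | zero =>
    intro _
    exact ⟨[], 0, by rw [List.range_zero, List.foldl_nil, pv_outP_zero], by simp,
      by simp [pvRecs]⟩
  | succ t ih =>
    intro hn
    obtain ⟨dq, head, hfold, hhead, hdrop⟩ := ih (by omega)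
    rw [List.range_succ, List.foldl_append, List.foldl_cons, List.foldl_nil, hfold]
    obtain ⟨dq₁, hdq₁, hh1, hd1⟩ :
        ∃ dq₁, (if 1 ≤ t then pvPop d head (d.getD (t - 1) 0) dq ++ [t - 1] else dq) = dq₁ ∧
          head ≤ dq₁.length ∧ dq₁.drop head = pvRecs d (t - 1 - k.toNat) t := by
      by_cases ht1 : 1 ≤ t
      · rw [if_pos ht1]
        refine ⟨_, rfl, ?_, ?_⟩
        · rw [pv_pop_split d _ dq head hhead]
          simp only [List.length_append, List.length_take]
          omega
        · rw [pv_pop_split d _ dq head hhead, hdrop, List.append_assoc,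
            List.drop_append_of_le_length (by simp only [List.length_take]; omega),
            List.drop_eq_nil_of_le (by simp only [List.length_take]; omega),
            List.nil_append]
          have hp := pv_push d (t - 1 - k.toNat) (t - 1) (by omega)
          rw [show t - 1 + 1 = t from by omega] at hp
          exact hp
      · have ht0 : t = 0 := by omega
        subst ht0
        rw [if_neg ht1]
        exact ⟨dq, rfl, hhead, by simpa using hdrop⟩
    simp only [pvStep]
    rw [hdq₁]
    by_cases hKt : k.toNat ≤ t
    · have hge : (t : Int) - k ≥ 0 := by omega
      rw [if_pos hge]
      obtain ⟨a1, a2, a3⟩ := pv_adv dq₁ ((t : Int) - k) head hh1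
      rw [hd1] at a3
      rw [pv_dropWhile_congr _ (fun j => decide (j < t - k.toNat)) _
        (fun x _ => by rw [decide_eq_decide]; exact pv_cast_lt_iff k t x hk)] at a3
      rw [← pv_dropWhile_filter (t - k.toNat) _ (pv_sorted_recs d (t - 1 - k.toNat) t),
        ← pv_recs_mono d (t - 1 - k.toNat) (t - k.toNat) t (by omega)] at a3
      obtain ⟨m, rest, hrec, hm1, hm2, hmax⟩ :=
        pv_recs_head d (t - k.toNat) t (by omega)
      have hget : dq₁.getD (pvAdv dq₁ ((t : Int) - k) head) 0 = m :=
        pv_getD_drop _ _ _ _ (by rw [a3, hrec])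
      obtain ⟨⟨j, hj1, hj2, hjv⟩, hub⟩ := pv_wmax_spec d k.toNat t hK1 hKt
      have hval : d.getD m 0 = pvWmax d k.toNat t :=
        le_antisymm (hub m hm1 hm2) (by rw [hjv]; exact hmax j hj1 hj2)
      refine ⟨dq₁, pvAdv dq₁ ((t : Int) - k) head, ?_, a2, ?_⟩
      · have hout : (pvOutP d k.toNat n t).set t (d.getD (dq₁.getD (pvAdv dq₁ ((t : Int) - k) head) 0) 0)
            = pvOutP d k.toNat n (t + 1) := by
          unfold pvOutP
          exact pv_set_map_range _ _ _ (by omega)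
            (fun s hs => if_congr (by omega) rfl rfl)
            (by rw [if_pos ⟨by omega, hKt⟩, hget, hval])
        rw [hout]
      · rw [a3]
        rw [show t + 1 - 1 - k.toNat = t - k.toNat from by omega,
          show t + 1 - 1 = t from by omega]
    · have hge : ¬ ((t : Int) - k ≥ 0) := by omega
      rw [if_neg hge]
      refine ⟨dq₁, head, ?_, hh1, ?_⟩
      · have hout : pvOutP d k.toNat n t = pvOutP d k.toNat n (t + 1) := by
          unfold pvOutP
          exact List.map_congr_left fun s _ => if_congr (by omega) rfl rfl
        rw [hout]
      · rw [hd1]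
        rw [show t + 1 - 1 - k.toNat = t - 1 - k.toNat from by omega,
          show t + 1 - 1 = t from by omega]

-- A's loop: a fold that conditionally sets one fresh slot per iteration builds the mapped list
lemma pv_fold_sets (n K : Nat) (G : Nat → Int) (F : List Int → Nat → List Int)
    (hF : ∀ out m, m < n → F out m = if K ≤ m then out.set m (G m) else out) :
    ∀ m, m ≤ n → (List.range m).foldl F ((List.range n).map (fun _ => (1 : Int))) =
      (List.range n).map (fun s => if s < m ∧ K ≤ s then G s else 1) := by
  intro m
  induction m with
  | zero =>
    intro _
    exact List.map_congr_left fun s _ => (if_neg (by omega)).symm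
  | succ m ih =>
    intro h
    rw [List.range_succ, List.foldl_append, List.foldl_cons, List.foldl_nil, ih (by omega),
      hF _ m (by omega)]
    by_cases hKm : K ≤ m
    · rw [if_pos hKm]
      exact pv_set_map_range _ _ _ (by omega)
        (fun s hs => if_congr (by omega) rfl rfl)
        (by rw [if_pos ⟨by omega, hKm⟩])
    · rw [if_neg hKm]
      exact List.map_congr_left fun s _ => if_congr (by omega) rfl rfl

lemma pv_charA (a : List Int) (k : Int) (hk : 1 ≤ k) :
    dx_max a k = pvOutP (pvDiffs a) k.toNat a.length a.length := by
  have hK1 : 1 ≤ k.toNat := by omega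
  unfold dx_max
  simp only []
  rw [PySem.List.pyRange_one, show ((a.length : Int) - 0).toNat = a.length from by omega,
    List.foldl_map,
    show a.map (fun _ => (1 : Int)) = (List.range a.length).map (fun _ => (1 : Int)) from by
      rw [List.map_const', List.map_const', List.length_range]]
  exact pv_fold_sets a.length k.toNat (pvWmax (pvDiffs a) k.toNat) _
    (by
      intro out m hm
      simp only [zero_add]
      by_cases hKm : k.toNat ≤ m
      · have hge : (m : Int) - k ≥ 0 := by omega
        rw [if_pos hge, if_pos hKm]
        have htemp : (PySem.List.pyRange ((m : Int) - k) (m : Int) 1).map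
            (fun i => PySem.List.pyGetD a (i + 1) 0 - PySem.List.pyGetD a i 0)
            = (List.range k.toNat).map (fun j => (pvDiffs a).getD (m - k.toNat + j) 0) := by
          rw [PySem.List.pyRange_one,
            show ((m : Int) - ((m : Int) - k)).toNat = k.toNat from by omega,
            List.map_map]
          apply List.map_congr_left
          intro j hj
          rw [List.mem_range] at hj
          show PySem.List.pyGetD a (((m : Int) - k) + (j : Int) + 1) 0
              - PySem.List.pyGetD a (((m : Int) - k) + (j : Int)) 0
              = (pvDiffs a).getD (m - k.toNat + j) 0
          rw [show ((m : Int) - k) + (j : Int) + 1 = ((m - k.toNat + j + 1 : Nat) : Int) from by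
                push_cast; omega,
            show ((m : Int) - k) + (j : Int) = ((m - k.toNat + j : Nat) : Int) from by
                push_cast; omega,
            PySem.List.pyGetD_natCast, PySem.List.pyGetD_natCast]
          unfold pvDiffs
          rw [PySem.List.getD_map_range (fun i => a.getD (i + 1) 0 - a.getD i 0)
            (a.length - 1) (m - k.toNat + j) 0 (by omega)]
        rw [htemp]
        have hwin : (List.range k.toNat).map (fun j => (pvDiffs a).getD (m - k.toNat + j) 0)
            = (pvDiffs a).getD (m - k.toNat) 0 ::
              (List.range' (m - k.toNat + 1) (k.toNat - 1)).map (fun j => (pvDiffs a).getD j 0) := by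
          exact pv_range_map_cons (fun x => (pvDiffs a).getD x 0) k.toNat (m - k.toNat) hK1
        rw [hwin, PySem.List.max?_id_cons, Option.getD_some, PySem.List.pySetD_natCast]
        rfl
      · have hge : ¬ ((m : Int) - k ≥ 0) := by omega
        rw [if_neg hge, if_neg hKm]) a.length le_rfl

lemma pv_main (a : List Int) (k : Int) (hk : 1 ≤ k) :
    dx_max a k = dx_max_alt a k := by
  obtain ⟨dq, head, hfold, _, _⟩ := pv_invB (pvDiffs a) k hk a.length a.length le_rfl
  rw [pv_charA a k hk]
  show pvOutP (pvDiffs a) k.toNat a.length a.length =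
    ((List.range a.length).foldl (pvStep (pvDiffs a) k)
      ((List.replicate a.length (1 : Int)), ([] : List Nat), 0)).1
  rw [show List.replicate a.length (1 : Int) = (List.range a.length).map (fun _ => (1 : Int)) from by
    rw [List.map_const', List.length_range], hfold]

-- ===== VERDICT (by name: the statement is the Claim_ definition above) =====
theorem dx_max_spec : Claim_equal_dx_max := by
  intro a k _ hpre
  unfold Spec_dx_max
  rcases hpre with hk | hnil
  · exact pv_main a k hk
  · subst hnil
    simp [dx_max, dx_max_alt, PySem.List.pyRange_one_eq_nil]
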